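-- pv_equiv track=rewrite | github.com/lifecat-stack/Lifecat-Python | python_download_image_1.1.py | img_filter
-- ===== SOURCE A (Python) =====
-- def img_filter(imgs):
--     x = 0
--     fimgs = []
--     for img in imgs:
--         x += 1
--         if x % 3 == 0:
--             fimgs.append(img)
--     return fimgs
-- ===== SOURCE B (Python) =====
-- def img_filter(imgs):
--     return list(imgs[2::3])
-- ===== Notes on version B (the rewrite author's own statement) =====
-- stated objective: simpler
-- what changed: Replaces the counter-and-modulo loop with a single extended-slice stride expression imgs[2::3], eliminating the explicit loop, the counter and the modulo test.
import Mathlib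
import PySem

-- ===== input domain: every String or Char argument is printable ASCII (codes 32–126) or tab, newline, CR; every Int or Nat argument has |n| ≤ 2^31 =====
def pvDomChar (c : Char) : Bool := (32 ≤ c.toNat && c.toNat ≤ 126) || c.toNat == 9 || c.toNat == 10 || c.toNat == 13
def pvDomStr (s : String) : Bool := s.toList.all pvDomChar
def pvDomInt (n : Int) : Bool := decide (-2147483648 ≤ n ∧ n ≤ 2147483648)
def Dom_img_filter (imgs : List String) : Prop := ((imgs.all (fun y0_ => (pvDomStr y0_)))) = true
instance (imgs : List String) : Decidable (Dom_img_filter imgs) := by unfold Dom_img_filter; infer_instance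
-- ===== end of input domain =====

-- B replaces A's counter-and-modulo loop with a single stride slice imgs[2::3] (objective: simpler).


-- ===== PORT A =====
-- the for-loop: state is (x, fimgs)
def imgFilterLoop : List String → Int → List String → List String
  | [], _, fimgs => fimgs
  | img :: rest, x, fimgs =>
    let x' := x + 1
    imgFilterLoop rest x' (if PySem.Int.mod x' 3 == 0 then fimgs ++ [img] else fimgs)

def img_filter (imgs : List String) : List String :=
  imgFilterLoop imgs 0 []

-- ===== PORT B =====
-- list(imgs[2::3]); step is the literal 3 ≠ 0, so the slice always yields a value
def img_filter_alt (imgs : List String) : List String :=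
  (PySem.List.slice? imgs (some 2) none 3).getD []

-- ===== PRECONDITION & SPEC =====
def Spec_img_filter (imgs : List String) (out : List String) : Prop := out = img_filter_alt imgs
instance (imgs : List String) (out : List String) : Decidable (Spec_img_filter imgs out) := by unfold Spec_img_filter; infer_instance

-- ===== CLAIM (what is proved, stated in full; the proofs are below) =====
def Claim_equal_img_filter : Prop := ∀ (imgs : List String), Dom_img_filter imgs → Spec_img_filter imgs (img_filter imgs)

-- ===== LEMMAS AND PROOFS =====

-- common characterization: every third element (indices 2, 5, 8, …)
def everyThird : List String → List String
  | _ :: _ :: c :: t => c :: everyThird t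
  | _ => []

theorem mod3_eq (x : Int) : PySem.Int.mod x 3 = x % 3 := by
  show x.fmod 3 = x % 3
  simp [Int.fmod_eq_emod]

theorem loopA_eq (n : Nat) : ∀ (l : List String), l.length ≤ n → ∀ (x : Int) (acc : List String),
    x % 3 = 0 → imgFilterLoop l x acc = acc ++ everyThird l := by
  induction n with
  | zero =>
    intro l hl x acc hx
    match l with
    | [] => simp [imgFilterLoop, everyThird]
    | _ :: _ => simp at hl
  | succ n ih =>
    intro l hl x acc hx
    match l with
    | [] => simp [imgFilterLoop, everyThird]
    | [a] =>
      simp [imgFilterLoop, everyThird]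
      omega
    | [a, b] =>
      have h1 : ¬ (3 ∣ x + 1) := by omega
      have h2 : ¬ (3 ∣ x + 1 + 1) := by omega
      simp [imgFilterLoop, everyThird, h1, h2]
    | a :: b :: c :: t =>
      have h1 : ¬ (3 ∣ x + 1) := by omega
      have h2 : ¬ (3 ∣ x + 1 + 1) := by omega
      have h3 : (x + 1 + 1 + 1) % 3 = 0 := by omega
      have hlen : t.length ≤ n := by simp at hl; omega
      simp only [imgFilterLoop, mod3_eq, h3]
      simp only [everyThird]
      rw [ih t (by omega) _ _ h3]
      simp [h1, h2]

theorem slice_unfold (imgs : List String) :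
    PySem.List.slice? imgs (some 2) none 3 =
      some (List.filterMap (fun k : Nat => imgs[2 + 3 * k]?) (List.range (imgs.length / 3))) := by
  simp [PySem.List.slice?, PySem.List.sliceIndices]
  by_cases h : 2 < imgs.length
  · have hmin : min 2 (imgs.length : Int) = 2 := by omega
    simp [h, hmin]
    have hc : (((imgs.length : Int) - 2 + 3 - 1) / 3).toNat = imgs.length / 3 := by omega
    rw [hc]
    congr 1
  · have h3 : imgs.length / 3 = 0 := by omega
    simp [h, h3]

theorem stride_eq (n : Nat) : ∀ (l : List String), l.length ≤ n →
    List.filterMap (fun k : Nat => l[2 + 3 * k]?) (List.range (l.length / 3)) = everyThird l := by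
  induction n with
  | zero =>
    intro l hl
    match l with
    | [] => simp [everyThird]
    | _ :: _ => simp at hl
  | succ n ih =>
    intro l hl
    match l with
    | [] => simp [everyThird]
    | [a] => simp [everyThird]
    | [a, b] => simp [everyThird]
    | a :: b :: c :: t =>
      have hlen : (a :: b :: c :: t).length / 3 = t.length / 3 + 1 := by
        simp; omega
      rw [hlen, List.range_succ_eq_map]
      simp only [List.filterMap_cons, List.filterMap_map]
      have hf : ((fun k : Nat => (a :: b :: c :: t)[2 + 3 * k]?) ∘ Nat.succ) =
          (fun k : Nat => t[2 + 3 * k]?) := by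
        funext k
        have h5 : 2 + 3 * Nat.succ k = ((2 + 3 * k) + 1 + 1) + 1 := by omega
        simp [Function.comp, h5]
      rw [hf, ih t (by simp at hl; omega)]
      simp [everyThird]

theorem sliceB_eq : ∀ (imgs : List String),
    img_filter_alt imgs = everyThird imgs := by
  intro imgs
  unfold img_filter_alt
  rw [slice_unfold, stride_eq imgs.length imgs le_rfl]
  rfl

-- ===== VERDICT (by name: the statement is the Claim_ definition above) =====
theorem img_filter_spec : Claim_equal_img_filter := by
  intro imgs _
  unfold Spec_img_filter img_filter
  rw [loopA_eq imgs.length imgs le_rfl 0 [] (by decide), sliceB_eq]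
  simp
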